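-- pv_equiv track=rewrite | github.com/djdjhappy/Learning | Recursion-1.py | count8
-- ===== SOURCE A (Python) =====
-- def count8(n, last = 0):
--     if n == 0:return 0
--     is8 = n % 10 == 8#这个数末位是否为8
--     cnt = last + 1 if is8 else 0
--     if is8:
--         cnt2 = count8(n // 10, last + 1)
--     else:
--         cnt2 = count8(n // 10, 0)
--     return cnt + cnt2
-- ===== SOURCE B (Python) =====
-- def count8(n, last=0):
--     total = 0
--     run = last
--     while n > 0:
--         if n % 10 == 8:
--             run += 1
--             total += run
--         else:
--             run = 0
--         n //= 10
--     return total
-- ===== Notes on version B (the rewrite author's own statement) =====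
-- stated objective: simpler
-- what changed: Replaces the per-digit recursion with a flat while loop maintaining a running run-length and total accumulator.
import Mathlib
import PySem

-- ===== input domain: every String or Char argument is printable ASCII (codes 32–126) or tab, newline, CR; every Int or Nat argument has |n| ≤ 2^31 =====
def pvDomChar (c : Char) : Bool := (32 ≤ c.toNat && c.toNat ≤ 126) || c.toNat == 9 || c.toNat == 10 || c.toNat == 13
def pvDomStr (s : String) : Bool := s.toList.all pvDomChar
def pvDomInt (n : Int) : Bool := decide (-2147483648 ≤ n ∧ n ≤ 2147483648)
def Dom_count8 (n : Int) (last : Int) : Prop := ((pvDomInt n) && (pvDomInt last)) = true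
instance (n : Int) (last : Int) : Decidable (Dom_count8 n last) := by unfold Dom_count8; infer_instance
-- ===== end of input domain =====

-- B replaces A's per-digit recursion by a flat accumulator loop (objective: simpler, same cost).

-- ===== PORT A =====
-- A's recursion; fuel only makes the recursion total in Lean (Python diverges for n < 0,
-- excluded by Pre_); fuel n.toNat + 1 is ≥ the number of recursive steps for n ≥ 0.
def count8Fuel : Nat → Int → Int → Int
  | 0, _, _ => 0
  | fuel + 1, n, last =>
    if n = 0 then 0
    else
      let is8 := PySem.Int.mod n 10 = 8
      let cnt := if is8 then last + 1 else 0
      let cnt2 := if is8 then count8Fuel fuel (PySem.Int.floordiv n 10) (last + 1)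
                  else count8Fuel fuel (PySem.Int.floordiv n 10) 0
      cnt + cnt2

def count8 (n : Int) (last : Int) : Int := count8Fuel (n.toNat + 1) n last

-- ===== PORT B =====
def count8AltLoop (n : Int) (run : Int) (total : Int) : Int :=
  if h : 0 < n then
    if PySem.Int.mod n 10 = 8 then
      count8AltLoop (PySem.Int.floordiv n 10) (run + 1) (total + (run + 1))
    else
      count8AltLoop (PySem.Int.floordiv n 10) 0 total
  else total
  termination_by n.toNat
  decreasing_by
  · have h1 := @PySem.Int.floordiv_lt_iff_lt_mul n 10 n (by norm_num)
    have h2 := @PySem.Int.le_floordiv_iff_mul_le n 10 0 (by norm_num)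
    omega
  · have h1 := @PySem.Int.floordiv_lt_iff_lt_mul n 10 n (by norm_num)
    have h2 := @PySem.Int.le_floordiv_iff_mul_le n 10 0 (by norm_num)
    omega

def count8_alt (n : Int) (last : Int) : Int := count8AltLoop n last 0

-- ===== PRECONDITION & SPEC =====
-- Pre_ excludes n < 0, where Python A recurses forever on n // 10 == -1 (RecursionError).
def Pre_count8 (n : Int) (last : Int) : Prop := 0 ≤ n
instance (n : Int) (last : Int) : Decidable (Pre_count8 n last) := by unfold Pre_count8; infer_instance
def pvWitness_count8 : Int × Int := (8808, 0)

def Spec_count8 (n : Int) (last : Int) (out : Int) : Prop := out = count8_alt n last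
instance (n : Int) (last : Int) (out : Int) : Decidable (Spec_count8 n last out) := by unfold Spec_count8; infer_instance

-- ===== CLAIM (what is proved, stated in full; the proofs are below) =====
def Claim_equal_count8 : Prop := ∀ (n : Int) (last : Int), Dom_count8 n last → Pre_count8 n last → Spec_count8 n last (count8 n last)

-- ===== LEMMAS AND PROOFS =====

theorem floordiv_ten_bounds (n : Int) (hn : 0 < n) :
    0 ≤ PySem.Int.floordiv n 10 ∧ PySem.Int.floordiv n 10 < n := by
  have h1 := @PySem.Int.le_floordiv_iff_mul_le n 10 0 (by norm_num)
  have h2 := @PySem.Int.floordiv_lt_iff_lt_mul n 10 n (by norm_num)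
  omega

theorem loop_eq_fuel (fuel : Nat) :
    ∀ (n run total : Int), 0 ≤ n → n.toNat < fuel →
      count8AltLoop n run total = total + count8Fuel fuel n run := by
  induction fuel with
  | zero => intro n run total _ h; omega
  | succ f ih =>
    intro n run total hn hf
    by_cases h0 : n = 0
    · subst h0
      rw [count8AltLoop]
      simp [count8Fuel]
    · have hpos : 0 < n := lt_of_le_of_ne hn (Ne.symm h0)
      obtain ⟨hq0, hqlt⟩ := floordiv_ten_bounds n hpos
      have hfq : (PySem.Int.floordiv n 10).toNat < f := by omega
      rw [count8AltLoop]
      simp only [hpos, dif_pos]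
      by_cases h8 : PySem.Int.mod n 10 = 8
      · rw [if_pos h8, ih _ _ _ hq0 hfq]
        rw [PySem.Int.mod_eq_emod_of_pos (by norm_num)] at h8
        simp [count8Fuel, h0, h8]
        ring
      · rw [if_neg h8, ih _ _ _ hq0 hfq]
        rw [PySem.Int.mod_eq_emod_of_pos (by norm_num)] at h8
        simp [count8Fuel, h0, h8]

-- ===== VERDICT (by name: the statement is the Claim_ definition above) =====
theorem count8_spec : Claim_equal_count8 := by
  intro n last _ hpre
  unfold Spec_count8 count8 count8_alt
  have := loop_eq_fuel (n.toNat + 1) n last 0 hpre (by omega)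
  omega
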